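-- pv_equiv track=rewrite | github.com/iremcngz/chess | chess_game.py | find_minors
-- ===== SOURCE A (Python) =====
-- def find_minors(matrix):
--     if len(matrix)==3:
--         minors1=[]
--         minors2=[]
--         minors3=[]
--         minors4=[]
--         minors5=[]
--         minors6=[]
--         minors7=[]
--         minors8=[]
--         minors9=[]
--         for i in range(1,3):
--             minors1.append(list([matrix[i][1],matrix[i][2]]))
--         for i in range(1,3):
--             minors2.append(list([matrix[i][0],matrix[i][2]]))
--         for i in range(1,3):
--             minors3.append(list([matrix[i][0],matrix[i][1]]))
--         for i in (0,2):
--             minors4.append(list([matrix[i][1],matrix[i][2]]))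
--         for i in (0,2):
--             minors5.append(list([matrix[i][0],matrix[i][2]]))
--         for i in (0,2):
--             minors6.append(list([matrix[i][0],matrix[i][1]]))
--         for i in range(2):
--             minors7.append(list([matrix[i][1],matrix[i][2]]))
--         for i in range(2):
--             minors8.append(list([matrix[i][0],matrix[i][2]]))
--         for i in range(2):
--             minors9.append(list([matrix[i][0],matrix[i][1]]))
--     return minors1,minors2,minors3,minors4,minors5,minors6,minors7,minors8,minors9
-- ===== SOURCE B (Python) =====
-- def find_minors(matrix):
--     if len(matrix) == 3:
--         minors = []
--         for dr in range(3):
--             for dc in range(3):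
--                 minors.append([[matrix[r][c] for c in range(3) if c != dc]
--                                for r in range(3) if r != dr])
--     return tuple(minors)
-- ===== Notes on version B (the rewrite author's own statement) =====
-- stated objective: simpler
-- what changed: Replaces A's nine copy-pasted accumulator loops (one per minor, with hand-enumerated row index sets) by a single nested loop over the deleted row and deleted column indices that builds each 2x2 minor with a comprehension.
import Mathlib
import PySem

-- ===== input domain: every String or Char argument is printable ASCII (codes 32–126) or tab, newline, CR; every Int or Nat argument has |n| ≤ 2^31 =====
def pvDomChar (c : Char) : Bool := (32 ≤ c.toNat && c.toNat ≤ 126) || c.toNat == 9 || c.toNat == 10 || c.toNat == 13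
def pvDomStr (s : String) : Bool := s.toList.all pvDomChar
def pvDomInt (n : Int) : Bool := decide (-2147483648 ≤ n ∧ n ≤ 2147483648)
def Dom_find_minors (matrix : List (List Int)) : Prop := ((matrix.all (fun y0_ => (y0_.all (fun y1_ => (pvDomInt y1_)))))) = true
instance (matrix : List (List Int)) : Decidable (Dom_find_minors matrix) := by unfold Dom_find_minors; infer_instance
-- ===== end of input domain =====

-- B replaces the nine copy-pasted loops of A by one nested loop over the deleted
-- row/column index (objective: simpler). Return value only; neither raises inside Pre_.

-- matrix[i][j]; none (Python IndexError) is excluded by Pre_find_minors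
def pvAt (matrix : List (List Int)) (i j : Int) : Int :=
  (((PySem.List.pyGet? matrix i).bind (fun r => PySem.List.pyGet? r j)).getD 0)

-- ===== PORT A =====
-- the len(matrix)!=3 branch raises UnboundLocalError in Python; excluded by Pre_find_minors
def find_minors (matrix : List (List Int)) : List (List (List Int)) :=
  if matrix.length = 3 then
    let m1 := (PySem.List.pyRange 1 3 1).foldl (fun a i => a ++ [[pvAt matrix i 1, pvAt matrix i 2]]) []
    let m2 := (PySem.List.pyRange 1 3 1).foldl (fun a i => a ++ [[pvAt matrix i 0, pvAt matrix i 2]]) []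
    let m3 := (PySem.List.pyRange 1 3 1).foldl (fun a i => a ++ [[pvAt matrix i 0, pvAt matrix i 1]]) []
    let m4 := ([0, 2] : List Int).foldl (fun a i => a ++ [[pvAt matrix i 1, pvAt matrix i 2]]) []
    let m5 := ([0, 2] : List Int).foldl (fun a i => a ++ [[pvAt matrix i 0, pvAt matrix i 2]]) []
    let m6 := ([0, 2] : List Int).foldl (fun a i => a ++ [[pvAt matrix i 0, pvAt matrix i 1]]) []
    let m7 := (PySem.List.pyRange 0 2 1).foldl (fun a i => a ++ [[pvAt matrix i 1, pvAt matrix i 2]]) []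
    let m8 := (PySem.List.pyRange 0 2 1).foldl (fun a i => a ++ [[pvAt matrix i 0, pvAt matrix i 2]]) []
    let m9 := (PySem.List.pyRange 0 2 1).foldl (fun a i => a ++ [[pvAt matrix i 0, pvAt matrix i 1]]) []
    [m1, m2, m3, m4, m5, m6, m7, m8, m9]
  else []

-- ===== PORT B =====
-- the len(matrix)!=3 branch raises UnboundLocalError in Python; excluded by Pre_find_minors
def find_minors_alt (matrix : List (List Int)) : List (List (List Int)) :=
  if matrix.length = 3 then
    (PySem.List.pyRange 0 3 1).foldl (fun acc dr =>
      (PySem.List.pyRange 0 3 1).foldl (fun acc2 dc =>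
        acc2 ++ [((PySem.List.pyRange 0 3 1).filter (fun r => r ≠ dr)).map (fun r =>
                  ((PySem.List.pyRange 0 3 1).filter (fun c => c ≠ dc)).map (fun c =>
                    pvAt matrix r c))]) acc) []
  else []

-- ===== PRECONDITION & SPEC =====
-- Pre_: exactly the inputs on which Python A returns (len(matrix)==3, else UnboundLocalError;
-- every row needs at least 3 entries, else IndexError)
def Pre_find_minors (matrix : List (List Int)) : Prop :=
  matrix.length = 3 ∧ ∀ row ∈ matrix, 3 ≤ row.length
instance (matrix : List (List Int)) : Decidable (Pre_find_minors matrix) := by unfold Pre_find_minors; infer_instance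
def pvWitness_find_minors : List (List Int) := [[1, 2, 3], [4, 5, 6], [7, 8, 9]]
def Spec_find_minors (matrix : List (List Int)) (out : List (List (List Int))) : Prop := out = find_minors_alt matrix
instance (matrix : List (List Int)) (out : List (List (List Int))) : Decidable (Spec_find_minors matrix out) := by unfold Spec_find_minors; infer_instance

-- ===== CLAIM (what is proved, stated in full; the proofs are below) =====
def Claim_equal_find_minors : Prop := ∀ (matrix : List (List Int)), Dom_find_minors matrix → Pre_find_minors matrix → Spec_find_minors matrix (find_minors matrix)

-- ===== LEMMAS AND PROOFS =====

-- ===== VERDICT =====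
theorem find_minors_spec : Claim_equal_find_minors := by
  intro matrix _ hpre
  obtain ⟨h3, hrows⟩ := hpre
  rcases matrix with _ | ⟨r0, _ | ⟨r1, _ | ⟨r2, _ | ⟨r3, m⟩⟩⟩⟩ <;> simp_all
  have h0 := hrows.1; have h1 := hrows.2.1; have h2 := hrows.2.2
  rcases r0 with _ | ⟨a0, _ | ⟨a1, _ | ⟨a2, t0⟩⟩⟩ <;> simp_all
  rcases r1 with _ | ⟨b0, _ | ⟨b1, _ | ⟨b2, t1⟩⟩⟩ <;> simp_all
  rcases r2 with _ | ⟨c0, _ | ⟨c1, _ | ⟨c2, t2⟩⟩⟩ <;> simp_all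
  unfold Spec_find_minors find_minors find_minors_alt pvAt
  simp [PySem.List.pyRange, PySem.List.pyGet?, PySem.List.pyIdx?, List.range_succ]
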